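-- pv_equiv track=rewrite | github.com/xzheng2/ainex_xyz | docker/rosa-agent/ainex_agent_tools/bt_analysis/raw_tick.py | _detect_order
-- ===== SOURCE A (Python) =====
-- def _detect_order(entries: list) -> str:
--     """Detect whether entries are newest-first or oldest-first by tick_id sequence.
--
--     Looks at the first and last entries with a valid tick_id.
--
--     Returns: "newest-first" | "oldest-first" | "single" | "unknown"
--     """
--     tick_ids = [
--         e["parsed"]["tick_id"]
--         for e in entries
--         if e.get("parsed") and "tick_id" in e["parsed"]
--     ]
--     if len(tick_ids) < 2:
--         return "single" if len(tick_ids) == 1 else "unknown"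
--     if tick_ids[0] > tick_ids[-1]:
--         return "newest-first"
--     if tick_ids[0] < tick_ids[-1]:
--         return "oldest-first"
--     return "unknown"
-- ===== SOURCE B (Python) =====
-- def _detect_order(entries: list) -> str:
--     """Detect ordering by comparing the first and last valid tick_id, without
--     building the full tick_id list (early-exit two-ended scan)."""
--     rest = None
--     first = None
--     for i, e in enumerate(entries):
--         p = e.get("parsed")
--         if p and "tick_id" in p:
--             first = p["tick_id"]
--             rest = entries[i + 1:]
--             break
--     if rest is None:
--         return "unknown"
--     for e in reversed(rest):
--         p = e.get("parsed")
--         if p and "tick_id" in p: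
--             last = p["tick_id"]
--             if first > last:
--                 return "newest-first"
--             if first < last:
--                 return "oldest-first"
--             return "unknown"
--     return "single"
-- ===== Notes on version B (the rewrite author's own statement) =====
-- stated objective: alternative
-- what changed: Instead of materialising the full list of tick_ids and indexing its ends, B does an early-exit forward scan for the first valid tick_id and an early-exit backward scan over the remainder for the last one, branching unknown/single/compare from those two scans.
import Mathlib
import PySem

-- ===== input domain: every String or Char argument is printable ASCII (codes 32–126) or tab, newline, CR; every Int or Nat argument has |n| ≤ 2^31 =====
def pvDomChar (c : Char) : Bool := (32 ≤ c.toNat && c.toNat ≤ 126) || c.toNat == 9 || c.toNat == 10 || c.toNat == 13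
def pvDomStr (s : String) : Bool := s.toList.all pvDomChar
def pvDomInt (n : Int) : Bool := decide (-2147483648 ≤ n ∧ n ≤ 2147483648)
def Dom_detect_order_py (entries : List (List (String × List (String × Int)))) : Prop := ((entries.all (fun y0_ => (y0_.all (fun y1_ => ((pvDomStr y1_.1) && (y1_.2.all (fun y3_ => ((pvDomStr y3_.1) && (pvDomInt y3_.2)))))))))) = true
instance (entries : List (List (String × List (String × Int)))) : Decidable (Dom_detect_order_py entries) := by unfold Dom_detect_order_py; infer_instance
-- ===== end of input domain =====

-- B replaces A's build-the-whole-tick_id-list-then-index approach by two early-exit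
-- scans (forward for the first valid tick_id, backward for the last): alternative decomposition, same O(n) cost.

-- shared validity/extraction: e.get("parsed") truthy (non-empty dict) and "tick_id" in it
def pvTick? (e : List (String × List (String × Int))) : Option Int :=
  match (PySem.Dict.mk e).get? "parsed" with
  | none => none
  | some p => if p.isEmpty then none else (PySem.Dict.mk p).get? "tick_id"

-- ===== PORT A =====
def detect_order_py (entries : List (List (String × List (String × Int)))) : String :=
  let tick_ids := entries.filterMap pvTick?
  if tick_ids.length < 2 then
    if tick_ids.length == 1 then "single" else "unknown"
  else
    -- tick_ids[0] and tick_ids[-1]; both in range because length ≥ 2 here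
    let h := tick_ids.headD 0
    let l := tick_ids.getLastD 0
    if h > l then "newest-first" else if h < l then "oldest-first" else "unknown"

-- ===== PORT B =====
-- forward scan: first valid tick_id and the entries after it (entries[i+1:])
def pvFirstTick : List (List (String × List (String × Int))) → Option (Int × List (List (String × List (String × Int))))
  | [] => none
  | e :: t =>
    match pvTick? e with
    | some v => some (v, t)
    | none => pvFirstTick t

-- backward scan over the remainder (given already reversed): first hit decides
def pvLastScan : List (List (String × List (String × Int))) → Int → String
  | [], _ => "single"
  | e :: t, first =>
    match pvTick? e with
    | some last =>
      if first > last then "newest-first"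
      else if first < last then "oldest-first"
      else "unknown"
    | none => pvLastScan t first

def detect_order_py_alt (entries : List (List (String × List (String × Int)))) : String :=
  match pvFirstTick entries with
  | none => "unknown"
  | some (first, rest) => pvLastScan rest.reverse first

-- ===== PRECONDITION & SPEC =====
def Spec_detect_order_py (entries : List (List (String × List (String × Int)))) (out : String) : Prop := out = detect_order_py_alt entries
instance (entries : List (List (String × List (String × Int)))) (out : String) : Decidable (Spec_detect_order_py entries out) := by unfold Spec_detect_order_py; infer_instance

-- ===== CLAIM (what is proved, stated in full; the proofs are below) =====
def Claim_equal_detect_order_py : Prop := ∀ (entries : List (List (String × List (String × Int)))), Dom_detect_order_py entries → Spec_detect_order_py entries (detect_order_py entries)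

-- ===== LEMMAS AND PROOFS =====

lemma pvFirstTick_spec (l : List (List (String × List (String × Int)))) :
    (pvFirstTick l = none ∧ l.filterMap pvTick? = []) ∨
    ∃ v rest, pvFirstTick l = some (v, rest) ∧ l.filterMap pvTick? = v :: rest.filterMap pvTick? := by
  induction l with
  | nil => left; exact ⟨rfl, rfl⟩
  | cons e t ih =>
    cases h : pvTick? e with
    | some v => right; exact ⟨v, t, by simp [pvFirstTick, h], by simp [pvFirstTick, List.filterMap_cons, h]⟩
    | none =>
      rcases ih with ⟨h1, h2⟩ | ⟨v, rest, h1, h2⟩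
      · left; exact ⟨by simp [pvFirstTick, h, h1], by simp [h, h2]⟩
      · right; exact ⟨v, rest, by simp [pvFirstTick, h, h1], by simp [h, h2]⟩

lemma pvLastScan_eq (m : List (List (String × List (String × Int)))) (first : Int) :
    pvLastScan m first =
      match (m.filterMap pvTick?).head? with
      | none => "single"
      | some last =>
        if first > last then "newest-first"
        else if first < last then "oldest-first"
        else "unknown" := by
  induction m with
  | nil => rfl
  | cons e t ih =>
    cases h : pvTick? e with
    | some v => simp [pvLastScan, h]
    | none => simp [pvLastScan, h, ih]

-- ===== VERDICT (by name: the statement is the Claim_ definition above) =====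
theorem detect_order_py_spec : Claim_equal_detect_order_py := by
  intro entries _
  unfold Spec_detect_order_py detect_order_py detect_order_py_alt
  rcases pvFirstTick_spec entries with ⟨h1, h2⟩ | ⟨v, rest, h1, h2⟩
  · simp [h1, h2]
  · rw [h1, h2]
    show _ = pvLastScan rest.reverse v
    rw [pvLastScan_eq, List.filterMap_reverse, List.head?_reverse]
    cases hts : (rest.filterMap pvTick?).getLast? with
    | none =>
      have : rest.filterMap pvTick? = [] := List.getLast?_eq_none_iff.mp hts
      simp [this]
    | some w =>
      have hne : rest.filterMap pvTick? ≠ [] := by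
        intro h; rw [h] at hts; simp at hts
      have hlen : 1 ≤ (rest.filterMap pvTick?).length := List.length_pos_iff.mpr hne
      have hlast : (v :: rest.filterMap pvTick?).getLastD 0 = w := by
        rw [List.getLastD_eq_getLast?, List.getLast?_cons, hts]; rfl
      simp only [List.length_cons, List.headD_cons, hlast]
      have : ¬ (rest.filterMap pvTick?).length + 1 < 2 := by omega
      simp [this]
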